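-- pv_equiv track=rewrite | github.com/lihuining/2025_deep_learning | coding/0417.py | find_last_remaining
-- ===== SOURCE A (Python) =====
-- def find_last_remaining(nums_list):
--     # 连续计数器
--     count = 1
--     # 当前字符/数字记录器
--     current = nums_list[0]
--     for i in range(1, len(nums_list)):
--         # 如果当前字符/数字与前一个相同，则连续计数器加1
--         if nums_list[i] == current:
--             count += 1
--             # 如果连续出现了3次，则删除这3个元素
--             if count == 3:
--                 # 从列表中删除出现3次的数字/字符
--                 del nums_list[i-2:i+1]
--                 break
--         else:
--             # 否则，重置连续计数器和当前字符/数字记录器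
--             count = 1
--             current = nums_list[i]
--     # 如果列表中所有的元素都没有连续出现3次以上，则返回原列表
--     return nums_list
-- ===== SOURCE B (Python) =====
-- def find_last_remaining(nums_list):
--     # Two-stage run-length decomposition: stage 1 compresses the list into
--     # (value, length) runs by jump-scanning; stage 2 rebuilds the list,
--     # dropping 3 elements from the first run of length >= 3.
--     runs = []
--     n = len(nums_list)
--     i = 0
--     while i < n:
--         v = nums_list[i]
--         j = i
--         while j < n and nums_list[j] == v:
--             j += 1
--         runs.append((v, j - i))
--         i = j
--     out = []
--     removed = False
--     for v, c in runs:
--         if not removed and c >= 3: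
--             out.extend([v] * (c - 3))
--             removed = True
--         else:
--             out.extend([v] * c)
--     nums_list[:] = out
--     return nums_list
-- ===== Notes on version B (the rewrite author's own statement) =====
-- stated objective: alternative
-- what changed: Replaces A's single-pass count/current state machine with a two-stage run-length decomposition: compress the list into (value,length) runs by jump-scanning, then rebuild it while dropping 3 elements from the first run of length >= 3.
-- outside the precondition, e.g. on find_last_remaining([]): A raises IndexError, B returns []
import Mathlib
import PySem

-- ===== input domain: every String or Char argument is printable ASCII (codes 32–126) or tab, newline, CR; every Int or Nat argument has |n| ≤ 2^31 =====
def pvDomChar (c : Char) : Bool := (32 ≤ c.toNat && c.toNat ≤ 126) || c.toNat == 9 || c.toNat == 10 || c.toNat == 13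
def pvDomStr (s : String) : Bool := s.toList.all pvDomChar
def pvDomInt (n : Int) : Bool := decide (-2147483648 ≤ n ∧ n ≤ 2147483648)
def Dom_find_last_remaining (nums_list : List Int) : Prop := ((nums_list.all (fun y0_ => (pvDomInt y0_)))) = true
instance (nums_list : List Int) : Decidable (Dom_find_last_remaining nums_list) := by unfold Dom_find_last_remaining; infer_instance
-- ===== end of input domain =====

-- B replaces A's single-pass count/current state machine with a two-stage
-- run-length decomposition (compress into (value,length) runs, then rebuild
-- dropping 3 from the first run of length >= 3); same O(n) cost, different
-- algorithm. Both A and B mutate the Python list in place; the equivalence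
-- proved here is about the return value only (the in-place contents coincide
-- with the returned list in both).


-- ===== PORT A =====
-- the 'for i in range(1, len)' loop with 'break'; state: count, current.
-- 'del nums_list[i-2:i+1]' = nums_list[:i-2] ++ nums_list[i+1:].
def findLoopA (nums : List Int) (count current : Int) (idxs : List Int) : List Int :=
  match idxs with
  | [] => nums
  | i :: rest =>
    match PySem.List.pyGet? nums i with
    | none => nums  -- unreachable: i drawn from range(1, len(nums))
    | some x =>
      if x = current then
        if count + 1 = 3 then
          PySem.List.slice nums none (some (i - 2)) ++ PySem.List.slice nums (some (i + 1)) none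
        else findLoopA nums (count + 1) current rest
      else findLoopA nums 1 x rest

def find_last_remaining (nums_list : List Int) : List Int :=
  match PySem.List.pyGet? nums_list 0 with
  | none => []  -- nums_list[0] raises IndexError on the empty list (outside Pre_)
  | some current => findLoopA nums_list 1 current (PySem.List.pyRange 1 (PySem.List.len nums_list) 1)

-- ===== PORT B =====
-- stage 1 of Source B: the inner 'while j < n and nums_list[j] == v' jump scan,
-- counting the equal elements from the current position (j - i); the count is
-- a length, hence Nat is exact here. The outer loop's index i into the fixed
-- list is ported as structural recursion on the remaining suffix (drop).
def runPrefixLen (v : Int) : List Int → Nat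
  | [] => 0
  | x :: r => if x = v then runPrefixLen v r + 1 else 0

-- termination helper for buildRuns (cited by name in decreasing_by)
lemma runPrefixLen_cons_self (v : Int) (t : List Int) :
    runPrefixLen v (v :: t) = runPrefixLen v t + 1 := by simp [runPrefixLen]

-- stage 1 outer 'while i < n:' loop: compress into (value, length) runs.
def buildRuns : List Int → List (Int × Nat)
  | [] => []
  | v :: t =>
    let k := runPrefixLen v (v :: t)
    (v, k) :: buildRuns ((v :: t).drop k)
termination_by xs => xs.length
decreasing_by
  simp [List.length_drop, runPrefixLen_cons_self]

-- stage 2 of Source B: the 'for v, c in runs' rebuild with the 'removed' flag.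
def rebuild : List (Int × Nat) → Bool → List Int
  | [], _ => []
  | (v, c) :: r, removed =>
    if removed = false ∧ 3 ≤ c then
      List.replicate (c - 3) v ++ rebuild r true
    else
      List.replicate c v ++ rebuild r removed

def find_last_remaining_alt (nums_list : List Int) : List Int :=
  rebuild (buildRuns nums_list) false

-- ===== PRECONDITION & SPEC =====
-- Pre_ excludes only the empty list, on which A raises IndexError (it reads nums_list[0] unconditionally); B returns [] there.
def Pre_find_last_remaining (nums_list : List Int) : Prop := nums_list ≠ []
instance (nums_list : List Int) : Decidable (Pre_find_last_remaining nums_list) := by unfold Pre_find_last_remaining; infer_instance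
def pvWitness_find_last_remaining : List Int := [1, 2, 2, 2, 3]

def Spec_find_last_remaining (nums_list : List Int) (out : List Int) : Prop := out = find_last_remaining_alt nums_list
instance (nums_list : List Int) (out : List Int) : Decidable (Spec_find_last_remaining nums_list out) := by unfold Spec_find_last_remaining; infer_instance

-- ===== CLAIM (what is proved, stated in full; the proofs are below) =====
def Claim_equal_find_last_remaining : Prop := ∀ (nums_list : List Int), Dom_find_last_remaining nums_list → Pre_find_last_remaining nums_list → Spec_find_last_remaining nums_list (find_last_remaining nums_list)

-- ===== LEMMAS AND PROOFS =====

-- Proof-only intermediate program: a stateless sliding-window scan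
-- (bridge between A's state machine and B's run decomposition).
def findLoopB (nums : List Int) (idxs : List Int) : List Int :=
  match idxs with
  | [] => nums
  | i :: rest =>
    match PySem.List.pyGet? nums i, PySem.List.pyGet? nums (i + 1), PySem.List.pyGet? nums (i + 2) with
    | some a, some b, some c =>
      if a = b ∧ b = c then
        PySem.List.slice nums none (some i) ++ PySem.List.slice nums (some (i + 3)) none
      else findLoopB nums rest
    | _, _, _ => nums

-- Invariant linking A's (count, current) state at index i with the window pointer i-2.
lemma key (nums : List Int) (i : Nat) (h2 : 2 ≤ i) (hn : i ≤ nums.length)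
    (b2 b1 : Int) (hb2 : nums[i - 2]? = some b2) (hb1 : nums[i - 1]? = some b1) :
    findLoopA nums (if b1 = b2 then 2 else 1) b1 (PySem.List.pyRange (i : Int) (nums.length : Int) 1)
      = findLoopB nums (PySem.List.pyRange ((i : Int) - 2) ((nums.length : Int) - 2) 1) := by
  generalize hd : nums.length - i = d
  induction d generalizing i b1 b2 with
  | zero =>
    rw [PySem.List.pyRange_one_eq_nil (by omega : (nums.length : Int) ≤ (i : Int)),
        PySem.List.pyRange_one_eq_nil (by omega : (nums.length : Int) - 2 ≤ (i : Int) - 2)]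
    simp [findLoopA, findLoopB]
  | succ d ih =>
    have hlt : i < nums.length := by omega
    have hx : nums[i]? = some nums[i] := List.getElem?_eq_getElem hlt
    have e2 : (i : Int) - 2 = ((i - 2 : Nat) : Int) := by omega
    have f1 : ((i - 2 : Nat) : Int) + 1 = ((i - 1 : Nat) : Int) := by omega
    have f0 : ((i - 2 : Nat) : Int) + 2 = ((i : Nat) : Int) := by omega
    have f3 : ((i - 2 : Nat) : Int) + 3 = (i : Int) + 1 := by omega
    have e1 : (i : Int) - 2 + 1 = ((i - 1 : Nat) : Int) := by omega
    have e4 : (i : Int) + 1 = ((i + 1 : Nat) : Int) := by omega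
    rw [PySem.List.pyRange_one_cons (by omega : (i : Int) < (nums.length : Int)),
        PySem.List.pyRange_one_cons (by omega : (i : Int) - 2 < (nums.length : Int) - 2)]
    simp only [findLoopA, findLoopB, e2, f1, f0, f3, PySem.List.pyGet?_natCast, hb2, hb1, hx]
    by_cases hxb1 : nums[i] = b1
    · by_cases hb12 : b1 = b2
      · simp only [hxb1, hb12]
        norm_num
      · simp only [hxb1, if_neg hb12]
        norm_num
        rw [if_neg (fun h => hb12 h.symm)]
        rw [e4]
        have := ih (i + 1) (by omega) (by omega) b1 nums[i]
          (by simpa using hb1) (by simpa using hx) (by omega)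
        rw [show ((i + 1 : Nat) : Int) - 2 = ((i - 1 : Nat) : Int) by omega] at this
        simp [hxb1] at this
        exact this
    · simp only [if_neg hxb1]
      rw [if_neg (by intro h; exact hxb1 h.2.symm)]
      rw [e4]
      have := ih (i + 1) (by omega) (by omega) b1 nums[i]
        (by simpa using hb1) (by simpa using hx) (by omega)
      rw [show ((i + 1 : Nat) : Int) - 2 = ((i - 1 : Nat) : Int) by omega] at this
      simp [hxb1] at this
      exact this

-- A equals the window scan (the old state machine collapses to the window test).
lemma A_eq_window (nums : List Int) (hpre : nums ≠ []) :
    find_last_remaining nums = findLoopB nums (PySem.List.pyRange 0 ((nums.length : Int) - 2) 1) := by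
  unfold find_last_remaining
  match nums with
  | [] => exact absurd rfl hpre
  | [a] =>
    simp [findLoopA, findLoopB,
      PySem.List.pyRange_one_eq_nil (by norm_num : (1 : Int) ≤ 1)]
  | a :: b :: t =>
    have h1 : (1:Int) < ((a :: b :: t).length : Int) := by
      have : 1 < (a :: b :: t).length := by simp
      exact_mod_cast this
    rw [PySem.List.pyGet?_zero_cons]
    simp only [PySem.List.len_eq]
    rw [PySem.List.pyRange_one_cons h1]
    have hget1 : PySem.List.pyGet? (a :: b :: t) 1 = some b := by
      simp [PySem.List.pyGet?, PySem.List.pyIdx?]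
    simp only [findLoopA, hget1]
    have hkey := key (a :: b :: t) 2 le_rfl (by simp) a b (by simp) (by simp)
    by_cases hba : b = a
    · rw [if_pos hba]
      subst hba
      rw [if_pos rfl] at hkey
      norm_num at hkey ⊢
      exact hkey
    · rw [if_neg hba]
      rw [if_neg hba] at hkey
      norm_num at hkey ⊢
      exact hkey

-- unfolding equations for the well-founded buildRuns
lemma buildRuns_nil : buildRuns [] = [] := by rw [buildRuns]

lemma buildRuns_cons (v : Int) (t : List Int) :
    buildRuns (v :: t) = (v, runPrefixLen v (v :: t)) :: buildRuns ((v :: t).drop (runPrefixLen v (v :: t))) := by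
  rw [buildRuns]

-- the equal prefix really is a replicate
lemma take_runPrefixLen (v : Int) : ∀ xs : List Int,
    xs.take (runPrefixLen v xs) = List.replicate (runPrefixLen v xs) v
  | [] => by simp [runPrefixLen]
  | x :: r => by
    by_cases hx : x = v
    · simp [runPrefixLen, hx, List.replicate_succ, take_runPrefixLen v r]
    · simp [runPrefixLen, hx]

lemma runPrefixLen_le (v : Int) : ∀ xs : List Int, runPrefixLen v xs ≤ xs.length
  | [] => by simp [runPrefixLen]
  | x :: r => by
    by_cases hx : x = v
    · simp only [runPrefixLen, if_pos hx, List.length_cons]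
      exact Nat.succ_le_succ (runPrefixLen_le v r)
    · simp [runPrefixLen, hx]

-- the element after the run differs from the run value
lemma drop_run_head (v : Int) : ∀ (xs : List Int) (x : Int) (t : List Int),
    xs.drop (runPrefixLen v xs) = x :: t → x ≠ v
  | [], x, t => by simp [runPrefixLen]
  | y :: r, x, t => by
    by_cases hy : y = v
    · simp only [runPrefixLen, if_pos hy, List.drop_succ_cons]
      exact drop_run_head v r x t
    · simp only [runPrefixLen, if_neg hy, List.drop_zero]
      intro h
      cases h
      exact hy

-- rebuilding with the flag already set is the identity (flatten)
lemma rebuild_true : ∀ xs : List Int, rebuild (buildRuns xs) true = xs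
  | [] => by simp [buildRuns_nil, rebuild]
  | v :: t => by
    rw [buildRuns_cons]
    simp only [rebuild]
    rw [if_neg (by simp)]
    have hrec := rebuild_true ((v :: t).drop (runPrefixLen v (v :: t)))
    rw [hrec]
    conv_rhs => rw [← List.take_append_drop (runPrefixLen v (v :: t)) (v :: t)]
    rw [take_runPrefixLen]
termination_by xs => xs.length
decreasing_by
  simp [List.length_drop, runPrefixLen_cons_self]

-- with all run lengths < 3 the 'removed' flag never fires
lemma rebuild_small : ∀ runs : List (Int × Nat), (∀ p ∈ runs, p.2 < 3) →
    rebuild runs false = rebuild runs true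
  | [], _ => rfl
  | (v, c) :: r, h => by
    have hc : c < 3 := h (v, c) (by simp)
    simp only [rebuild]
    rw [if_neg (by omega), if_neg (by simp)]
    rw [rebuild_small r (fun p hp => h p (by simp [hp]))]

-- run lengths are bounded by the list length
lemma buildRuns_counts : ∀ xs : List Int, ∀ p ∈ buildRuns xs, p.2 ≤ xs.length
  | [] => by simp [buildRuns_nil]
  | v :: t => by
    rw [buildRuns_cons]
    intro p hp
    rcases List.mem_cons.mp hp with h | h
    · subst h; exact runPrefixLen_le v (v :: t)
    · have := buildRuns_counts ((v :: t).drop (runPrefixLen v (v :: t))) p h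
      simp only [List.length_drop] at this
      omega
termination_by xs => xs.length
decreasing_by
  simp [List.length_drop, runPrefixLen_cons_self]

-- the window scan ignores a prefix it has already passed
lemma shift (pre rest : List Int) : ∀ (i : Int), 0 ≤ i →
    findLoopB (pre ++ rest) (PySem.List.pyRange ((pre.length : Int) + i) ((pre.length : Int) + ((rest.length : Int) - 2)) 1)
      = pre ++ findLoopB rest (PySem.List.pyRange i ((rest.length : Int) - 2) 1) := by
  intro i hi
  generalize hd : ((rest.length : Int) - 2 - i).toNat = d
  induction d generalizing i with
  | zero =>
    rw [PySem.List.pyRange_one_eq_nil (by omega), PySem.List.pyRange_one_eq_nil (by omega)]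
    simp [findLoopB]
  | succ d ih =>
    have hlt : i < (rest.length : Int) - 2 := by omega
    obtain ⟨j, rfl⟩ : ∃ j : Nat, (j : Int) = i := ⟨i.toNat, by omega⟩
    have hj : j + 2 < rest.length := by omega
    have g0 : PySem.List.pyGet? (pre ++ rest) ((pre.length : Int) + (j : Int)) = some rest[j] := by
      rw [show (pre.length : Int) + (j : Int) = ((pre.length + j : Nat) : Int) by push_cast; ring,
        PySem.List.pyGet?_natCast, List.getElem?_append_right (by omega)]
      simp [List.getElem?_eq_getElem (show j < rest.length by omega)]
    have g1 : PySem.List.pyGet? (pre ++ rest) ((pre.length : Int) + (j : Int) + 1) = some rest[j+1] := by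
      rw [show (pre.length : Int) + (j : Int) + 1 = ((pre.length + (j+1) : Nat) : Int) by push_cast; ring,
        PySem.List.pyGet?_natCast, List.getElem?_append_right (by omega)]
      simp [List.getElem?_eq_getElem (show j + 1 < rest.length by omega)]
    have g2 : PySem.List.pyGet? (pre ++ rest) ((pre.length : Int) + (j : Int) + 2) = some rest[j+2] := by
      rw [show (pre.length : Int) + (j : Int) + 2 = ((pre.length + (j+2) : Nat) : Int) by push_cast; ring,
        PySem.List.pyGet?_natCast, List.getElem?_append_right (by omega)]
      simp [List.getElem?_eq_getElem hj]
    have r0 : PySem.List.pyGet? rest ((j : Int)) = some rest[j] := by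
      rw [PySem.List.pyGet?_natCast]; simp [List.getElem?_eq_getElem (show j < rest.length by omega)]
    have r1 : PySem.List.pyGet? rest ((j : Int) + 1) = some rest[j+1] := by
      rw [show (j : Int) + 1 = ((j+1 : Nat) : Int) by push_cast; ring, PySem.List.pyGet?_natCast]
      simp [List.getElem?_eq_getElem (show j + 1 < rest.length by omega)]
    have r2 : PySem.List.pyGet? rest ((j : Int) + 2) = some rest[j+2] := by
      rw [show (j : Int) + 2 = ((j+2 : Nat) : Int) by push_cast; ring, PySem.List.pyGet?_natCast]
      simp [List.getElem?_eq_getElem hj]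
    rw [PySem.List.pyRange_one_cons (by omega), PySem.List.pyRange_one_cons hlt]
    simp only [findLoopB, g0, g1, g2, r0, r1, r2]
    by_cases htrig : rest[j] = rest[j+1] ∧ rest[j+1] = rest[j+2]
    · rw [if_pos htrig, if_pos htrig]
      rw [show (pre.length : Int) + (j : Int) = ((pre.length + j : Nat) : Int) by push_cast; ring]
      rw [show ((pre.length + j : Nat) : Int) + 3 = ((pre.length + (j + 3) : Nat) : Int) by push_cast; ring]
      rw [show (j : Int) + 3 = ((j + 3 : Nat) : Int) by push_cast; ring]
      rw [PySem.List.slice_to_natCast, PySem.List.slice_from_natCast,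
          PySem.List.slice_to_natCast, PySem.List.slice_from_natCast,
          List.take_append, List.drop_append,
          List.take_of_length_le (by omega : pre.length ≤ pre.length + j),
          List.drop_eq_nil_of_le (by omega : pre.length ≤ pre.length + (j + 3))]
      simp [List.append_assoc]
    · rw [if_neg htrig, if_neg htrig]
      have := ih ((j : Int) + 1) (by omega) (by omega)
      rw [show (pre.length : Int) + (j : Int) + 1 = (pre.length : Int) + ((j : Int) + 1) by ring]
      exact this

-- shift specialised to the whole tail range
lemma shift0 (pre rest : List Int) :
    findLoopB (pre ++ rest) (PySem.List.pyRange (pre.length : Int) (((pre ++ rest).length : Int) - 2) 1)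
      = pre ++ findLoopB rest (PySem.List.pyRange 0 ((rest.length : Int) - 2) 1) := by
  have hs := shift pre rest 0 le_rfl
  rw [show (pre.length : Int) + 0 = (pre.length : Int) by ring] at hs
  rw [show (pre.length : Int) + ((rest.length : Int) - 2) = (((pre ++ rest).length : Int) - 2) by
    simp; ring] at hs
  exact hs

-- the window scan equals B's run decomposition
lemma winRuns : ∀ xs : List Int, xs ≠ [] →
    findLoopB xs (PySem.List.pyRange 0 ((xs.length : Int) - 2) 1) = rebuild (buildRuns xs) false := by
  intro xs
  generalize hn : xs.length = n
  induction n using Nat.strong_induction_on generalizing xs with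
  | _ n ih =>
  intro hne
  match xs, hne with
  | v :: t, _ =>
  subst hn
  set k := runPrefixLen v (v :: t) with hk
  have hk1 : 1 ≤ k := by rw [hk, runPrefixLen_cons_self]; omega
  have hkle : k ≤ (v :: t).length := runPrefixLen_le v (v :: t)
  have hsplit : (v :: t) = List.replicate k v ++ (v :: t).drop k := by
    conv_lhs => rw [← List.take_append_drop k (v :: t)]
    rw [hk, take_runPrefixLen]
  by_cases h3 : 3 ≤ k
  · -- the first run triggers the window at index 0
    have hlen3 : 3 ≤ (v :: t).length := le_trans h3 hkle
    have hget : ∀ m : Nat, m < k → (v :: t)[m]? = some v := by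
      intro m hm
      conv_lhs => rw [hsplit]
      rw [List.getElem?_append_left (by simp; omega)]
      simp [List.getElem?_eq_getElem (show m < (List.replicate k v).length by simp; omega)]
    have g0 : PySem.List.pyGet? (v :: t) 0 = some v := by
      rw [show (0 : Int) = ((0 : Nat) : Int) by simp, PySem.List.pyGet?_natCast, hget 0 (by omega)]
    have g1 : PySem.List.pyGet? (v :: t) 1 = some v := by
      rw [show (1 : Int) = ((1 : Nat) : Int) by simp, PySem.List.pyGet?_natCast, hget 1 (by omega)]
    have g2 : PySem.List.pyGet? (v :: t) 2 = some v := by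
      rw [show (2 : Int) = ((2 : Nat) : Int) by simp, PySem.List.pyGet?_natCast, hget 2 (by omega)]
    rw [PySem.List.pyRange_one_cons (by omega : (0 : Int) < ((v :: t).length : Int) - 2)]
    have h01 : (0 : Int) + 1 = 1 := by norm_num
    have h02 : (0 : Int) + 2 = 2 := by norm_num
    simp only [findLoopB, h01, h02, g0, g1, g2]
    rw [if_pos (by simp)]
    rw [show (0 : Int) = ((0 : Nat) : Int) by simp,
        show ((0 : Nat) : Int) + 3 = ((3 : Nat) : Int) by norm_num,
        PySem.List.slice_to_natCast, PySem.List.slice_from_natCast]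
    simp only [List.take_zero, List.nil_append]
    have hdrop : (v :: t).drop 3 = List.replicate (k - 3) v ++ (v :: t).drop k := by
      conv_lhs => rw [hsplit]
      rw [show k = 3 + (k - 3) by omega, List.replicate_add, List.append_assoc]
      rw [show (3 : Nat) = (List.replicate 3 v).length by simp]
      rw [List.drop_append]
      simp
    rw [hdrop]
    rw [buildRuns_cons]
    simp only [← hk, rebuild]
    rw [if_pos (by exact ⟨by simp, h3⟩), rebuild_true]
  · -- first run shorter than 3: no window fires inside it
    by_cases hshort : (v :: t).length < 3
    · -- no window at all; all run lengths are < 3 so rebuild is the identity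
      rw [PySem.List.pyRange_one_eq_nil (by omega)]
      simp only [findLoopB]
      rw [rebuild_small _ (fun p hp => by
        have := buildRuns_counts (v :: t) p hp; omega), rebuild_true]
    · push_neg at hshort
      have hlen3 : 3 ≤ (v :: t).length := hshort
      interval_cases k
      · -- k = 1 : xs = v :: rest with rest[0] ≠ v
        have hrest1 : t ≠ [] := by
          intro h; rw [h] at hlen3; simp at hlen3
        match t, hrest1, hk with
        | r0 :: t', _, hk =>
        have hr0 : r0 ≠ v := by
          apply drop_run_head v (v :: r0 :: t') r0 t'
          rw [← hk]; simp
        have g0 : PySem.List.pyGet? (v :: r0 :: t') 0 = some v := by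
          rw [PySem.List.pyGet?_zero_cons]
        have g1 : PySem.List.pyGet? (v :: r0 :: t') 1 = some r0 := by
          simp [PySem.List.pyGet?, PySem.List.pyIdx?]
        rw [PySem.List.pyRange_one_cons (by omega : (0 : Int) < ((v :: r0 :: t').length : Int) - 2)]
        have hg2 : ∃ w, PySem.List.pyGet? (v :: r0 :: t') ((0:Int) + 2) = some w := by
          rw [show (0 : Int) + 2 = ((2 : Nat) : Int) by norm_num, PySem.List.pyGet?_natCast]
          exact ⟨_, List.getElem?_eq_getElem (by simp only [List.length_cons] at hlen3 ⊢; omega : 2 < (v :: r0 :: t').length)⟩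
        obtain ⟨w, hw⟩ := hg2
        simp only [findLoopB, show (0:Int) + 1 = 1 by norm_num, g0, g1, hw]
        rw [if_neg (by intro h; exact hr0 h.1.symm)]
        -- step over the prefix [v] and recurse on the tail
        have hs := shift0 [v] (r0 :: t')
        have hih := ih ((r0 :: t').length) (by simp) (r0 :: t') rfl (by simp)
        simp only [List.singleton_append, List.length_cons, List.length_nil] at hs hih ⊢
        push_cast [zero_add] at hs hih ⊢
        rw [hs, hih]
        conv_rhs => rw [buildRuns_cons]
        rw [← hk]
        simp [rebuild]
      · -- k = 2 : xs = v :: v :: rest with rest[0] ≠ v (if any)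
        have ht : t = v :: t.drop 1 := by
          have h := hsplit
          rw [show List.replicate 2 v = [v, v] from rfl] at h
          simpa using h
        generalize hr : t.drop 1 = rest at ht
        subst ht
        have hrest1 : rest ≠ [] := by
          intro h; rw [h] at hlen3; simp at hlen3
        match rest, hrest1, hk with
        | r0 :: t'', _, hk =>
        have hr0 : r0 ≠ v := by
          apply drop_run_head v (v :: v :: r0 :: t'') r0 t''
          rw [← hk]; simp
        rw [PySem.List.pyRange_one_cons (by omega : (0 : Int) < ((v :: v :: r0 :: t'').length : Int) - 2)]
        have g0 : PySem.List.pyGet? (v :: v :: r0 :: t'') 0 = some v := PySem.List.pyGet?_zero_cons ..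
        have g1 : PySem.List.pyGet? (v :: v :: r0 :: t'') 1 = some v := by
          simp [PySem.List.pyGet?, PySem.List.pyIdx?]
          rw [if_pos (by omega)]
          simp
        have g2 : PySem.List.pyGet? (v :: v :: r0 :: t'') ((0:Int) + 2) = some r0 := by
          simp [PySem.List.pyGet?, PySem.List.pyIdx?]
          rw [if_pos (by omega)]
          simp
        simp only [findLoopB, show (0:Int) + 1 = 1 by norm_num, g0, g1, g2]
        rw [if_neg (by intro h; exact hr0 h.2.symm)]
        by_cases hlen4 : (v :: v :: r0 :: t'').length < 4
        · -- length exactly 3: the remaining range is empty, nothing is removed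
          have ht'' : t'' = [] := by
            cases t'' with
            | nil => rfl
            | cons a b => simp at hlen4; omega
          subst ht''
          rw [PySem.List.pyRange_one_eq_nil (by simp)]
          simp only [findLoopB]
          simp [buildRuns_cons, buildRuns_nil, runPrefixLen, hr0, rebuild]
        · -- length >= 4: the window at index 1 fails too; step over [v, v]
          push_neg at hlen4
          rw [PySem.List.pyRange_one_cons (by omega : (1 : Int) < ((v :: v :: r0 :: t'').length : Int) - 2)]
          have g2' : PySem.List.pyGet? (v :: v :: r0 :: t'') ((1:Int) + 1) = some r0 := by
            simp [PySem.List.pyGet?, PySem.List.pyIdx?]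
            rw [if_pos (by omega)]
            simp
          have hg3 : ∃ w, PySem.List.pyGet? (v :: v :: r0 :: t'') ((1:Int) + 2) = some w := by
            rw [show (1 : Int) + 2 = ((3 : Nat) : Int) by norm_num, PySem.List.pyGet?_natCast]
            exact ⟨_, List.getElem?_eq_getElem (by simpa using hlen4 : 3 < (v :: v :: r0 :: t'').length)⟩
          obtain ⟨w, hw⟩ := hg3
          simp only [findLoopB, g1, g2', hw]
          rw [if_neg (by intro h; exact hr0 h.1.symm)]
          have hs := shift0 [v, v] (r0 :: t'')
          have hih := ih ((r0 :: t'').length) (by simp) (r0 :: t'') rfl (by simp)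
          simp only [List.cons_append, List.nil_append, List.length_cons, List.length_nil] at hs hih ⊢
          push_cast [zero_add] at hs hih ⊢
          rw [hs, hih]
          conv_rhs => rw [buildRuns_cons]
          rw [← hk]
          simp [rebuild]

-- ===== VERDICT (by name: the statement is the Claim_ definition above) =====
theorem find_last_remaining_spec : Claim_equal_find_last_remaining := by
  intro nums _ hpre
  unfold Spec_find_last_remaining find_last_remaining_alt
  rw [A_eq_window nums hpre, winRuns nums hpre]
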